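-- pv_equiv track=rewrite | github.com/riverlee/Temp | OpenJaw-MIP/select_MIPs.py.11172014.py | gap_fills
-- ===== SOURCE A (Python) =====
-- def positions_in_range(position, threshold, position_list, strand="+"):
--     match_count = 0
--     for test_position in position_list:
--         if strand == "+":
--             if test_position >= position and test_position <= position + threshold:
--                 match_count += 1
--         else:
--             if test_position <= position and test_position >= position - threshold:
--                 match_count += 1
--     return match_count
--
-- def gap_fills(hom_data_h1, hom_data_h2, max_fill):
--     gap_fill_matches = 0
--     for chromosome in (set(hom_data_h1) & set(hom_data_h2)):
--         if '+' in hom_data_h1[chromosome] and '+' in hom_data_h2[chromosome]: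
--             h1_positions_pos = hom_data_h1[chromosome]["+"]
--             h2_positions_pos = hom_data_h2[chromosome]["+"]
--             for pos_position in h2_positions_pos:
--                 gap_fill_matches += positions_in_range(pos_position, max_fill, h1_positions_pos, "+")
--
--         if '-' in hom_data_h1[chromosome] and '-' in hom_data_h2[chromosome]:
--             h1_positions_neg = hom_data_h1[chromosome]["-"]
--             h2_positions_neg = hom_data_h2[chromosome]["-"]
--             for neg_position in h2_positions_neg:
--                 gap_fill_matches += positions_in_range(neg_position, max_fill, h1_positions_neg, "-")
--     return gap_fill_matches
-- ===== SOURCE B (Python) =====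
-- from bisect import bisect_left, bisect_right
--
-- def gap_fills(hom_data_h1, hom_data_h2, max_fill):
--     # Sort each h1 position list once; count the window [pos, pos+max_fill]
--     # (or [pos-max_fill, pos] on '-') by two binary searches per h2 position.
--     if max_fill < 0:
--         return 0
--     total = 0
--     for chromosome, strands1 in hom_data_h1.items():
--         strands2 = hom_data_h2.get(chromosome)
--         if strands2 is None:
--             continue
--         for strand in ("+", "-"):
--             if strand in strands1 and strand in strands2:
--                 h1_sorted = sorted(strands1[strand])
--                 for p in strands2[strand]:
--                     if strand == "+":
--                         lo, hi = p, p + max_fill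
--                     else:
--                         lo, hi = p - max_fill, p
--                     total += bisect_right(h1_sorted, hi) - bisect_left(h1_sorted, lo)
--     return total
-- ===== Notes on version B (the rewrite author's own statement) =====
-- stated objective: alternative
-- what changed: Instead of a linear scan of all h1 positions for every h2 position, B sorts each h1 position list once and counts each window with two binary searches (bisect), returning 0 immediately when max_fill < 0 since every window is then empty.
import Mathlib
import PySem

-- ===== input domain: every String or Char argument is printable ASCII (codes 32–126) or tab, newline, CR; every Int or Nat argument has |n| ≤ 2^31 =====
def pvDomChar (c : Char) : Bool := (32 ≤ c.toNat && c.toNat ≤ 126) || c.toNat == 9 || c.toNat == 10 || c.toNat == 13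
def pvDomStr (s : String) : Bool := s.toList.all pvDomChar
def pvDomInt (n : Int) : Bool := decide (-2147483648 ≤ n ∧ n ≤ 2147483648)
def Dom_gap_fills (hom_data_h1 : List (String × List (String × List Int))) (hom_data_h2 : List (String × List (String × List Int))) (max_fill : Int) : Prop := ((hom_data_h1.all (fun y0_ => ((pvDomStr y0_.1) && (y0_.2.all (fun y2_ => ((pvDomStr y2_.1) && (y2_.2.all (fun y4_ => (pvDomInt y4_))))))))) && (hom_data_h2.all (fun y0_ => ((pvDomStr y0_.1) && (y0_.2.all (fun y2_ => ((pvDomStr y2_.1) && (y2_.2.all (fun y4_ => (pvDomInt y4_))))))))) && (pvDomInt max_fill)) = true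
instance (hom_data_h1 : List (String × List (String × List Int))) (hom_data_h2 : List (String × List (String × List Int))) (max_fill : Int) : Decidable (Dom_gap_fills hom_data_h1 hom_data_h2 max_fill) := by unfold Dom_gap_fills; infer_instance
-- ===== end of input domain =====

-- B replaces A's linear scan of all h1 positions for every h2 position by sorting each
-- h1 list once and counting each window with two binary searches (alternative algorithm).

-- shared input bridge (type convention): the Python dict-of-dicts argument as a PySem.Dict
def pvToDict (h : List (String × List (String × List Int))) :
    PySem.Dict String (PySem.Dict String (List Int)) :=
  PySem.Dict.ofList (h.map (fun p => (p.1, PySem.Dict.ofList p.2)))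

-- ===== PORT A =====
def positions_in_range (position threshold : Int) (position_list : List Int) (strand : String) : Int :=
  position_list.foldl (fun match_count test_position =>
    if strand == "+" then
      if position ≤ test_position && test_position ≤ position + threshold then match_count + 1 else match_count
    else
      if test_position ≤ position && position - threshold ≤ test_position then match_count + 1 else match_count) 0

def gap_fills (hom_data_h1 : List (String × List (String × List Int))) (hom_data_h2 : List (String × List (String × List Int))) (max_fill : Int) : Int :=
  let d1 := pvToDict hom_data_h1
  let d2 := pvToDict hom_data_h2
  -- 'for chromosome in set(hom_data_h1) & set(hom_data_h2)': the set is consumed by an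
  -- order-independent sum, so folding it in Set order is exact.
  (PySem.Set.inter (PySem.Set.ofList d1.keys) (PySem.Set.ofList d2.keys)).foldl
    (fun gap_fill_matches chromosome =>
      let c1 := d1.getD chromosome PySem.Dict.empty
      let c2 := d2.getD chromosome PySem.Dict.empty
      let gap_fill_matches :=
        if c1.contains "+" && c2.contains "+" then
          (c2.getD "+" []).foldl
            (fun acc pos_position => acc + positions_in_range pos_position max_fill (c1.getD "+" []) "+")
            gap_fill_matches
        else gap_fill_matches
      if c1.contains "-" && c2.contains "-" then
        (c2.getD "-" []).foldl
          (fun acc neg_position => acc + positions_in_range neg_position max_fill (c1.getD "-" []) "-")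
          gap_fill_matches
      else gap_fill_matches) 0

-- ===== PORT B =====
def gap_fills_alt (hom_data_h1 : List (String × List (String × List Int))) (hom_data_h2 : List (String × List (String × List Int))) (max_fill : Int) : Int :=
  if max_fill < 0 then 0 else
  let d1 := pvToDict hom_data_h1
  let d2 := pvToDict hom_data_h2
  d1.items.foldl (fun total ci =>
    match d2.get? ci.1 with
    | none => total
    | some strands2 =>
      ["+", "-"].foldl (fun total strand =>
        if ci.2.contains strand && strands2.contains strand then
          let h1_sorted := PySem.List.sorted (ci.2.getD strand []) (fun x => x) false
          (strands2.getD strand []).foldl (fun total p =>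
            let lo := if strand == "+" then p else p - max_fill
            let hi := if strand == "+" then p + max_fill else p
            total + ((PySem.List.bisectRight h1_sorted hi : Int) - (PySem.List.bisectLeft h1_sorted lo : Int)))
            total
        else total) total) 0

-- ===== PRECONDITION & SPEC =====
def Spec_gap_fills (hom_data_h1 : List (String × List (String × List Int))) (hom_data_h2 : List (String × List (String × List Int))) (max_fill : Int) (out : Int) : Prop := out = gap_fills_alt hom_data_h1 hom_data_h2 max_fill
instance (hom_data_h1 : List (String × List (String × List Int))) (hom_data_h2 : List (String × List (String × List Int))) (max_fill : Int) (out : Int) : Decidable (Spec_gap_fills hom_data_h1 hom_data_h2 max_fill out) := by unfold Spec_gap_fills; infer_instance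

-- ===== CLAIM (what is proved, stated in full; the proofs are below) =====
def Claim_equal_gap_fills : Prop := ∀ (hom_data_h1 : List (String × List (String × List Int))) (hom_data_h2 : List (String × List (String × List Int))) (max_fill : Int), Dom_gap_fills hom_data_h1 hom_data_h2 max_fill → Spec_gap_fills hom_data_h1 hom_data_h2 max_fill (gap_fills hom_data_h1 hom_data_h2 max_fill)

-- ===== LEMMAS AND PROOFS =====

-- the per-chromosome contribution both programs compute, as a pure count
def chromContrib (t : Int) (c1 c2 : PySem.Dict String (List Int)) : Int :=
  (if c1.contains "+" && c2.contains "+" then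
      ((c2.getD "+" []).map (fun p => ((c1.getD "+" []).countP (fun y => p ≤ y && y ≤ p + t) : Int))).sum
    else 0)
  + (if c1.contains "-" && c2.contains "-" then
      ((c2.getD "-" []).map (fun p => ((c1.getD "-" []).countP (fun y => y ≤ p && p - t ≤ y) : Int))).sum
    else 0)

-- the per-chromosome contribution of B, with the bisect differences still visible
def bContrib (t : Int) (c1 c2 : PySem.Dict String (List Int)) : Int :=
  (if c1.contains "+" && c2.contains "+" then
      ((c2.getD "+" []).map (fun p =>
        ((PySem.List.bisectRight (PySem.List.sorted (c1.getD "+" []) (fun x => x) false) (p + t) : Int)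
          - (PySem.List.bisectLeft (PySem.List.sorted (c1.getD "+" []) (fun x => x) false) p : Int)))).sum
    else 0)
  + (if c1.contains "-" && c2.contains "-" then
      ((c2.getD "-" []).map (fun p =>
        ((PySem.List.bisectRight (PySem.List.sorted (c1.getD "-" []) (fun x => x) false) p : Int)
          - (PySem.List.bisectLeft (PySem.List.sorted (c1.getD "-" []) (fun x => x) false) (p - t) : Int)))).sum
    else 0)

-- what B's per-item loop body adds to the accumulator
def fB (d2 : PySem.Dict String (PySem.Dict String (List Int))) (t : Int)
    (ci : String × PySem.Dict String (List Int)) : Int :=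
  match d2.get? ci.1 with
  | none => 0
  | some strands2 => bContrib t ci.2 strands2

theorem foldl_body_add {a : Type} (body : Int -> a -> Int) (f : a -> Int)
    (h : forall acc x, body acc x = acc + f x) :
    forall (xs : List a) (ini : Int), xs.foldl body ini = ini + (xs.map f).sum := by
  intro xs
  induction xs with
  | nil => intro ini; simp
  | cons x xs ih => intro ini; simp [List.foldl_cons, h, ih]; omega

theorem foldl_add_f {a : Type} (f : a -> Int) (xs : List a) (ini : Int) :
    xs.foldl (fun acc x => acc + f x) ini = ini + (xs.map f).sum :=
  foldl_body_add _ f (fun _ _ => rfl) xs ini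

theorem foldl_count (q : Int -> Bool) :
    forall (xs : List Int) (ini : Int),
      xs.foldl (fun acc y => if q y then acc + 1 else acc) ini = ini + (xs.countP q : Int) := by
  intro xs
  induction xs with
  | nil => intro ini; simp
  | cons x xs ih =>
    intro ini
    by_cases hx : q x <;> simp [List.foldl_cons, List.countP_cons, hx, ih] <;> push_cast <;> omega

theorem pir_pos (p t : Int) (xs : List Int) :
    positions_in_range p t xs "+" = (xs.countP (fun y => p <= y && y <= p + t) : Int) := by
  unfold positions_in_range
  have := foldl_count (fun y => p <= y && y <= p + t) xs 0
  simpa using this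

theorem pir_neg (p t : Int) (xs : List Int) :
    positions_in_range p t xs "-" = (xs.countP (fun y => y <= p && p - t <= y) : Int) := by
  unfold positions_in_range
  have hne : (("-" : String) == "+") = false := by decide
  simp only [hne, Bool.false_eq_true, if_false]
  have := foldl_count (fun y => y <= p && p - t <= y) xs 0
  simpa using this

theorem countP_cut (p : Int -> Bool) :
    forall (xs : List Int) (i : Nat), i <= xs.length ->
      (forall j (hj : j < xs.length), j < i -> p xs[j] = true) ->
      (forall j (hj : j < xs.length), i <= j -> p xs[j] = false) ->
      xs.countP p = i := by
  intro xs
  induction xs with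
  | nil => intro i hi _ _; simp at hi; simp [hi]
  | cons x xs ih =>
    intro i hi h1 h2
    cases i with
    | zero =>
      have hx : p x = false := h2 0 (by simp) (by omega)
      have : xs.countP p = 0 := ih 0 (by omega) (by omega)
        (fun j hj _ => by have := h2 (j + 1) (by simpa using Nat.succ_lt_succ hj) (by omega); simpa using this)
      simp [List.countP_cons, hx, this]
    | succ i =>
      have hx : p x = true := h1 0 (by simp) (by omega)
      have : xs.countP p = i := ih i (by simpa using hi)
        (fun j hj hji => by have := h1 (j + 1) (by simpa using Nat.succ_lt_succ hj) (by omega); simpa using this)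
        (fun j hj hji => by have := h2 (j + 1) (by simpa using Nat.succ_lt_succ hj) (by omega); simpa using this)
      simp [List.countP_cons, hx, this]

theorem bisectLeft_eq_countP (xs : List Int) (hs : xs.Pairwise (fun x y => x <= y)) (x : Int) :
    PySem.List.bisectLeft xs x = xs.countP (fun y => y < x) := by
  obtain ⟨hle, hlt, hge⟩ := PySem.List.bisectLeft_spec xs x hs
  refine (countP_cut (fun y => decide (y < x)) xs _ hle ?_ ?_).symm
  . intro j hj hji; simpa using hlt j hj hji
  . intro j hj hji; simpa using not_lt.mpr (hge j hj hji)

theorem bisectRight_eq_countP (xs : List Int) (hs : xs.Pairwise (fun x y => x <= y)) (x : Int) :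
    PySem.List.bisectRight xs x = xs.countP (fun y => y <= x) := by
  obtain ⟨hle, hlt, hge⟩ := PySem.List.bisectRight_spec xs x hs
  refine (countP_cut (fun y => decide (y <= x)) xs _ hle ?_ ?_).symm
  . intro j hj hji; simpa using hlt j hj hji
  . intro j hj hji; simpa using not_le.mpr (hge j hj hji)

theorem countP_window_split (lo hi : Int) (h : lo <= hi) :
    forall xs : List Int,
      xs.countP (fun y => y <= hi) = xs.countP (fun y => y < lo) + xs.countP (fun y => lo <= y && y <= hi) := by
  intro xs
  induction xs with
  | nil => simp
  | cons x xs ih =>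
    simp only [List.countP_cons, ih, decide_eq_true_eq, Bool.and_eq_true]
    split_ifs <;> omega

theorem window_count (xs : List Int) (lo hi : Int) (h : lo <= hi) :
    ((PySem.List.bisectRight (PySem.List.sorted xs (fun x => x) false) hi : Int)
      - (PySem.List.bisectLeft (PySem.List.sorted xs (fun x => x) false) lo : Int))
    = (xs.countP (fun y => lo <= y && y <= hi) : Int) := by
  have hp : (PySem.List.sorted xs (fun x => x) false).Pairwise (fun x y => x <= y) := by
    simpa using PySem.List.sorted_pairwise xs (fun x : Int => x)
  have hperm : (PySem.List.sorted xs (fun x => x) false).Perm xs := PySem.List.sorted_perm xs (fun x => x) false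
  rw [bisectLeft_eq_countP _ hp, bisectRight_eq_countP _ hp]
  rw [countP_window_split lo hi h]
  rw [hperm.countP_eq, hperm.countP_eq]
  push_cast; omega

theorem bContrib_eq_chromContrib (t : Int) (ht : ¬ (t < 0)) (c1 c2 : PySem.Dict String (List Int)) :
    bContrib t c1 c2 = chromContrib t c1 c2 := by
  unfold bContrib chromContrib
  have hP : ((c2.getD "+" []).map (fun p =>
        ((PySem.List.bisectRight (PySem.List.sorted (c1.getD "+" []) (fun x => x) false) (p + t) : Int)
          - (PySem.List.bisectLeft (PySem.List.sorted (c1.getD "+" []) (fun x => x) false) p : Int))))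
      = ((c2.getD "+" []).map (fun p => (((c1.getD "+" []).countP (fun y => p <= y && y <= p + t)) : Int))) := by
    refine List.map_congr_left (fun p _ => ?_)
    exact window_count _ p (p + t) (by omega)
  have hM : ((c2.getD "-" []).map (fun p =>
        ((PySem.List.bisectRight (PySem.List.sorted (c1.getD "-" []) (fun x => x) false) p : Int)
          - (PySem.List.bisectLeft (PySem.List.sorted (c1.getD "-" []) (fun x => x) false) (p - t) : Int))))
      = ((c2.getD "-" []).map (fun p => (((c1.getD "-" []).countP (fun y => y <= p && p - t <= y)) : Int))) := by
    refine List.map_congr_left (fun p _ => ?_)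
    rw [window_count _ (p - t) p (by omega)]
    have : (c1.getD "-" []).countP (fun y => p - t <= y && y <= p)
        = (c1.getD "-" []).countP (fun y => y <= p && p - t <= y) :=
      List.countP_congr (fun a _ => by rw [Bool.and_comm])
    rw [this]
  rw [hP, hM]

theorem nodup_pvToDict (h : List (String × List (String × List Int))) : (pvToDict h).keys.Nodup :=
  PySem.Dict.nodup_keys_ofList _

theorem inter_keys {v : Type} (d1 d2 : PySem.Dict String v) (hnd : d1.keys.Nodup) :
    PySem.Set.inter (PySem.Set.ofList d1.keys) (PySem.Set.ofList d2.keys)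
      = d1.keys.filter (fun c => d2.contains c) := by
  show (PySem.Set.ofList d1.keys).filter (fun c => (PySem.Set.ofList d2.keys).contains c)
      = d1.keys.filter (fun c => d2.contains c)
  rw [PySem.Set.ofList_eq_self_of_nodup _ hnd]
  refine List.filter_congr (fun c _ => ?_)
  rw [Bool.eq_iff_iff, PySem.Set.contains_iff, PySem.Set.mem_ofList, PySem.Dict.contains_iff_mem_keys]

theorem sum_map_if {a : Type} (p : a -> Bool) (f : a -> Int) :
    forall xs : List a, ((xs.filter p).map f).sum = (xs.map (fun x => if p x then f x else 0)).sum := by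
  intro xs
  induction xs with
  | nil => simp
  | cons x xs ih => by_cases hx : p x <;> simp [hx, ih]

-- A as a sum of per-chromosome contributions (holds for every max_fill)
theorem gap_fills_as_sum (h1 h2 : List (String × List (String × List Int))) (t : Int) :
    gap_fills h1 h2 t =
      (((pvToDict h1).keys.filter (fun c => (pvToDict h2).contains c)).map
        (fun c => chromContrib t ((pvToDict h1).getD c PySem.Dict.empty)
                                ((pvToDict h2).getD c PySem.Dict.empty))).sum := by
  simp only [gap_fills]
  rw [inter_keys (pvToDict h1) (pvToDict h2) (nodup_pvToDict h1)]
  refine Eq.trans (foldl_body_add _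
    (fun c => chromContrib t ((pvToDict h1).getD c PySem.Dict.empty) ((pvToDict h2).getD c PySem.Dict.empty))
    ?_ _ 0) (zero_add _)
  intro acc c
  dsimp only
  unfold chromContrib
  by_cases hP : (((pvToDict h1).getD c PySem.Dict.empty).contains "+"
      && ((pvToDict h2).getD c PySem.Dict.empty).contains "+") = true <;>
    by_cases hM : (((pvToDict h1).getD c PySem.Dict.empty).contains "-"
        && ((pvToDict h2).getD c PySem.Dict.empty).contains "-") = true <;>
      simp only [hP, hM, Bool.false_eq_true, if_true, if_false, foldl_add_f, pir_pos, pir_neg] <;> ring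

-- B as the same sum, when max_fill >= 0
theorem gap_fills_alt_as_sum (h1 h2 : List (String × List (String × List Int))) (t : Int) (ht : ¬ (t < 0)) :
    gap_fills_alt h1 h2 t =
      (((pvToDict h1).keys.filter (fun c => (pvToDict h2).contains c)).map
        (fun c => chromContrib t ((pvToDict h1).getD c PySem.Dict.empty)
                                ((pvToDict h2).getD c PySem.Dict.empty))).sum := by
  simp only [gap_fills_alt, if_neg ht]
  refine Eq.trans (foldl_body_add _ (fB (pvToDict h2) t) ?_ _ 0) ?_
  . intro acc ci
    dsimp only
    cases hg : (pvToDict h2).get? ci.1 with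
    | none => simp [fB, hg]
    | some strands2 =>
      simp only [fB, hg]
      unfold bContrib
      have e1 : (("+" : String) == "+") = true := rfl
      have e2 : (("-" : String) == "+") = false := by decide
      simp only [List.foldl_cons, List.foldl_nil, e1, e2, Bool.false_eq_true, if_true, if_false]
      by_cases hP : (ci.2.contains "+" && strands2.contains "+") = true <;>
        by_cases hM : (ci.2.contains "-" && strands2.contains "-") = true <;>
          simp only [hP, hM, Bool.false_eq_true, if_true, if_false, foldl_add_f] <;> ring
  . rw [PySem.Dict.items_eq_map_keys _ (nodup_pvToDict h1) PySem.Dict.empty, List.map_map]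
    rw [sum_map_if (fun c => (pvToDict h2).contains c)
      (fun c => chromContrib t ((pvToDict h1).getD c PySem.Dict.empty) ((pvToDict h2).getD c PySem.Dict.empty))]
    rw [zero_add]
    congr 1
    refine List.map_congr_left (fun c _ => ?_)
    simp only [Function.comp_apply]
    unfold fB
    cases hg : (pvToDict h2).get? c with
    | none =>
      have : (pvToDict h2).contains c = false := by
        rw [PySem.Dict.contains_eq_isSome_get?, hg]; rfl
      simp [this]
    | some strands2 =>
      have hcont : (pvToDict h2).contains c = true := by
        rw [PySem.Dict.contains_eq_isSome_get?, hg]; rfl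
      have hgd : (pvToDict h2).getD c PySem.Dict.empty = strands2 := by
        rw [PySem.Dict.getD_eq_get?_getD, hg]; rfl
      simp only [hcont, if_true, hgd]
      exact bContrib_eq_chromContrib t ht _ _

theorem chromContrib_neg (t : Int) (ht : t < 0) (c1 c2 : PySem.Dict String (List Int)) :
    chromContrib t c1 c2 = 0 := by
  unfold chromContrib
  have hp : forall (l : List Int) (p : Int), l.countP (fun y => p <= y && y <= p + t) = 0 :=
    fun l p => List.countP_eq_zero.mpr (fun a _ => by simp; omega)
  have hm : forall (l : List Int) (p : Int), l.countP (fun y => y <= p && p - t <= y) = 0 :=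
    fun l p => List.countP_eq_zero.mpr (fun a _ => by simp; omega)
  simp only [hp, hm]
  simp

-- ===== VERDICT (by name: the statement is the Claim_ definition above) =====
theorem gap_fills_spec : Claim_equal_gap_fills := by
  unfold Claim_equal_gap_fills
  intro h1 h2 t _
  unfold Spec_gap_fills
  by_cases ht : t < 0
  . rw [gap_fills_as_sum]
    simp only [gap_fills_alt, if_pos ht]
    simp [chromContrib_neg t ht]
  . rw [gap_fills_as_sum, gap_fills_alt_as_sum h1 h2 t ht]
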